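-- pv_equiv track=rewrite | github.com/tobiasv1337/home-assistant-uvi-hkvo-consumption-tracker | custom_components/uvi/parser.py | _months_range_label
-- ===== SOURCE A (Python) =====
-- _MONTH_ABBR = [
--     "", "Jan", "Feb", "Mar", "Apr", "May", "Jun",
--     "Jul", "Aug", "Sep", "Oct", "Nov", "Dec",
-- ]
--
-- def _month_label(month: int) -> str:
--     """Return abbreviated month name (1-based)."""
--     if 1 <= month <= 12:
--         return _MONTH_ABBR[month]
--     return str(month)
--
-- def _months_range_label(series: list[dict]) -> str:
--     """Return e.g. 'Jan\u2013Feb' from a comparison series."""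
--     months = sorted(int(item.get("month", 0)) for item in series if isinstance(item, dict))
--     months = [m for m in months if 1 <= m <= 12]
--     if not months:
--         return ""
--     if len(months) == 1:
--         return _month_label(months[0])
--     return f"{_month_label(months[0])}\u2013{_month_label(months[-1])}"
-- ===== SOURCE B (Python) =====
-- _MONTH_ABBR = [
--     "", "Jan", "Feb", "Mar", "Apr", "May", "Jun",
--     "Jul", "Aug", "Sep", "Oct", "Nov", "Dec",
-- ]
--
-- def _month_label(month: int) -> str:
--     """Return abbreviated month name (1-based)."""
--     if 1 <= month <= 12:
--         return _MONTH_ABBR[month]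
--     return str(month)
--
-- def _months_range_label(series: list[dict]) -> str:
--     """Return e.g. 'Jan\u2013Feb' via one pass keeping a running min/max/count."""
--     count = 0
--     lo = hi = 0
--     for item in series:
--         if isinstance(item, dict):
--             m = int(item.get("month", 0))
--             if 1 <= m <= 12:
--                 if count == 0:
--                     lo = hi = m
--                 else:
--                     if m < lo:
--                         lo = m
--                     if hi < m:
--                         hi = m
--                 count += 1
--     if count == 0:
--         return ""
--     if count == 1:
--         return _month_label(lo)
--     return f"{_month_label(lo)}\u2013{_month_label(hi)}"
-- ===== Notes on version B (the rewrite author's own statement) =====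
-- stated objective: alternative
-- what changed: Replaces building and sorting the whole month list (then filtering and indexing its ends) with a single pass that maintains a running min, max and count of in-range months; trades CPython's C-level sorted for a pure-Python O(n) loop of similar measured cost.
import Mathlib
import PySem

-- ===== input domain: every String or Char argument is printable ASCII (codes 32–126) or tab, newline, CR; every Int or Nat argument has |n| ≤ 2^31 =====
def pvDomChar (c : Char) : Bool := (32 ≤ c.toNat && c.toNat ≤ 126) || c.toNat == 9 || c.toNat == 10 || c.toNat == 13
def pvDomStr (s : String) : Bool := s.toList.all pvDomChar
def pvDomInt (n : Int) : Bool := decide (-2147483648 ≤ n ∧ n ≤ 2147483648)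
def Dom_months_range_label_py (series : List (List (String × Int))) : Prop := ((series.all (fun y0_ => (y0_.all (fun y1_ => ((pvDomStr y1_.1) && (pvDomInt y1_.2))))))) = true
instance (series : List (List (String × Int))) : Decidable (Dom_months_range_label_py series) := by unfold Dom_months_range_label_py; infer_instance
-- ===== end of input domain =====

-- B replaces build-then-sort with a single pass keeping a running min/max/count of in-range months.

-- ===== PORT A =====
-- _MONTH_ABBR
def pvMonthAbbr : List String :=
  ["", "Jan", "Feb", "Mar", "Apr", "May", "Jun",
   "Jul", "Aug", "Sep", "Oct", "Nov", "Dec"]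

-- _month_label (shared module helper, used by both A and B)
def pvMonthLabel (month : Int) : String :=
  if 1 ≤ month ∧ month ≤ 12 then PySem.List.pyGetD pvMonthAbbr month ""
  else PySem.Int.toStr month

-- item.get("month", 0); int() on an int is the identity; every item is a dict here
def pvGetMonth (item : List (String × Int)) : Int :=
  (PySem.Dict.ofList item).getD "month" 0

def months_range_label_py (series : List (List (String × Int))) : String :=
  let months0 := PySem.List.sorted (series.map pvGetMonth) (fun m => m) false
  let months := months0.filter (fun m => decide (1 ≤ m ∧ m ≤ 12))
  if months = [] then ""
  else if months.length = 1 then pvMonthLabel (PySem.List.pyGetD months 0 0)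
  else pvMonthLabel (PySem.List.pyGetD months 0 0) ++ "–" ++ pvMonthLabel (PySem.List.pyGetD months (-1) 0)

-- ===== PORT B =====
-- the loop body of Source B: state is (count, lo, hi)
def pvStep (st : Int × Int × Int) (item : List (String × Int)) : Int × Int × Int :=
  let m := pvGetMonth item
  if 1 ≤ m ∧ m ≤ 12 then
    match st with
    | (c, lo, hi) =>
      if c = 0 then (1, m, m)
      else (c + 1, if m < lo then m else lo, if hi < m then m else hi)
  else st

def months_range_label_py_alt (series : List (List (String × Int))) : String :=
  match series.foldl pvStep (0, 0, 0) with
  | (c, lo, hi) =>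
    if c = 0 then ""
    else if c = 1 then pvMonthLabel lo
    else pvMonthLabel lo ++ "–" ++ pvMonthLabel hi

-- ===== PRECONDITION & SPEC =====
def Spec_months_range_label_py (series : List (List (String × Int))) (out : String) : Prop := out = months_range_label_py_alt series
instance (series : List (List (String × Int))) (out : String) : Decidable (Spec_months_range_label_py series out) := by unfold Spec_months_range_label_py; infer_instance

-- ===== CLAIM (what is proved, stated in full; the proofs are below) =====
def Claim_equal_months_range_label_py : Prop := ∀ (series : List (List (String × Int))), Dom_months_range_label_py series → Spec_months_range_label_py series (months_range_label_py series)

-- ===== LEMMAS AND PROOFS =====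

-- the distilled update step (proof helper naming the loop body of Source B's port)
def pvUpd (s : Int × Int × Int) (m : Int) : Int × Int × Int :=
  match s with
  | (c, lo, hi) =>
    if c = 0 then (1, m, m)
    else (c + 1, if m < lo then m else lo, if hi < m then m else hi)

-- B's fold over the raw series equals pvUpd folded over the filtered month values
theorem pv_fold_step_eq (series : List (List (String × Int))) (st : Int × Int × Int) :
    series.foldl pvStep st =
      (((series.map pvGetMonth).filter (fun m => decide (1 ≤ m ∧ m ≤ 12))).foldl pvUpd st) := by
  rw [List.foldl_filter, List.foldl_map]
  congr 1
  funext s m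
  simp [pvStep, pvUpd]

-- with a positive count, pvUpd is length/min/max bookkeeping
theorem pv_fold_inv (t : List Int) (c lo hi : Int) (hc : 0 < c) :
    t.foldl pvUpd (c, lo, hi) = (c + t.length, t.foldl min lo, t.foldl max hi) := by
  induction t generalizing c lo hi with
  | nil => simp
  | cons m t ih =>
    simp only [List.foldl_cons, pvUpd]
    rw [if_neg (by omega : ¬ (c = 0)), ih (c + 1) _ _ (by omega)]
    have h1 : (if m < lo then m else lo) = min lo m := by
      rcases lt_or_ge m lo with h | h <;> simp [min_def] <;> omega
    have h2 : (if hi < m then m else hi) = max hi m := by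
      rcases lt_or_ge hi m with h | h <;> simp [max_def] <;> omega
    rw [h1, h2]
    simp
    omega

-- the whole fold from the zero state over a nonempty filtered list
theorem pv_fold_cons (x : Int) (t : List Int) :
    (x :: t).foldl pvUpd (0, 0, 0) = (1 + (t.length : Int), t.foldl min x, t.foldl max x) := by
  rw [List.foldl_cons]
  have h0 : pvUpd (0, 0, 0) x = (1, x, x) := by simp [pvUpd]
  rw [h0, pv_fold_inv t 1 x x (by omega)]

-- in a ≤-sorted nonempty list every element is at most the last
theorem pv_le_getLast {L : List Int} (hs : L.Pairwise (· ≤ ·)) (h : L ≠ []) :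
    ∀ y ∈ L, y ≤ L.getLast h := by
  induction L with
  | nil => simp at h
  | cons a t ih =>
    intro y hy
    cases t with
    | nil => simp at hy; simp [hy, List.getLast]
    | cons b u =>
      rw [List.getLast_cons (by simp)]
      rcases List.mem_cons.mp hy with rfl | hy'
      · exact le_trans (List.rel_of_pairwise_cons hs (List.getLast_mem _)) (le_refl _)
      · exact ih (List.pairwise_cons.mp hs).2 (by simp) y hy'

-- the filtered-then-sorted list A uses is sorted(filtered values)
theorem pv_months_eq (series : List (List (String × Int))) :
    (PySem.List.sorted (series.map pvGetMonth) (fun m => m) false).filter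
        (fun m => decide (1 ≤ m ∧ m ≤ 12)) =
      PySem.List.sorted ((series.map pvGetMonth).filter (fun m => decide (1 ≤ m ∧ m ≤ 12)))
        (fun m => m) false := by
  symm
  apply PySem.List.sorted_id_eq_of_perm_of_pairwise
  · exact (PySem.List.sorted_perm _ _ _).filter _
  · exact (PySem.List.sorted_pairwise (series.map pvGetMonth) (fun m => m)).filter _

-- head of the sorted nonempty list is the running min; last is the running max
theorem pv_sorted_head_last (x : Int) (t : List Int) :
    ∃ (hne : PySem.List.sorted (x :: t) (fun m => m) false ≠ []),
      PySem.List.pyGetD (PySem.List.sorted (x :: t) (fun m => m) false) 0 0 = t.foldl min x ∧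
      PySem.List.pyGetD (PySem.List.sorted (x :: t) (fun m => m) false) (-1) 0 = t.foldl max x := by
  set L := PySem.List.sorted (x :: t) (fun m => m) false with hL
  have hperm : L.Perm (x :: t) := PySem.List.sorted_perm _ _ _
  have hne : L ≠ [] := by
    intro h; have := hperm.length_eq; rw [h] at this; simp at this
  refine ⟨hne, ?_, ?_⟩
  · -- head = min
    obtain ⟨hd, tl, hcons⟩ := List.exists_cons_of_ne_nil hne
    have hmin : PySem.List.min? (x :: t) (fun m => m) = some (t.foldl min x) := by
      simpa using PySem.List.min?_id_cons x t
    have hm_mem : t.foldl min x ∈ (x :: t) := PySem.List.min?_mem hmin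
    have hm_le : ∀ y ∈ (x :: t), t.foldl min x ≤ y := by
      intro y hy; exact PySem.List.min?_isMin hmin y hy
    have hhd_le : ∀ y ∈ (x :: t), hd ≤ y := by
      have := PySem.List.key_head_sorted_le (xs := x :: t) (key := fun m => m) (hL.symm.trans hcons)
      simpa using this
    have h1 : hd ≤ t.foldl min x := hhd_le _ hm_mem
    have h2 : t.foldl min x ≤ hd := hm_le hd (hperm.mem_iff.mp (by rw [hcons]; simp))
    rw [hcons]
    simp [PySem.List.pyGetD_zero_cons]
    omega
  · -- last = max
    have hmax : PySem.List.max? (x :: t) (fun m => m) = some (t.foldl max x) := by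
      simpa using PySem.List.max?_id_cons x t
    have hm_mem : t.foldl max x ∈ (x :: t) := PySem.List.max?_mem hmax
    have hm_ge : ∀ y ∈ (x :: t), y ≤ t.foldl max x := by
      intro y hy; exact PySem.List.max?_isMax hmax y hy
    have hpw : L.Pairwise (· ≤ ·) := by
      have := PySem.List.sorted_pairwise (x :: t) (fun m => m)
      simpa using this
    have hlast_mem : L.getLast hne ∈ (x :: t) := hperm.mem_iff.mp (List.getLast_mem hne)
    have h1 : L.getLast hne ≤ t.foldl max x := hm_ge _ hlast_mem
    have h2 : t.foldl max x ≤ L.getLast hne :=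
      pv_le_getLast hpw hne _ (hperm.mem_iff.mpr hm_mem)
    rw [PySem.List.pyGetD_neg_one L 0 hne]
    omega

-- ===== VERDICT (by name: the statement is the Claim_ definition above) =====
theorem months_range_label_py_spec : Claim_equal_months_range_label_py := by
  intro series _
  unfold Spec_months_range_label_py months_range_label_py months_range_label_py_alt
  rw [pv_fold_step_eq]
  simp only []
  rw [pv_months_eq]
  set f := (series.map pvGetMonth).filter (fun m => decide (1 ≤ m ∧ m ≤ 12)) with hf
  clear_value f
  cases f with
  | nil => simp [PySem.List.sorted]
  | cons x t =>
    rw [pv_fold_cons]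
    obtain ⟨hne, hhead, hlast⟩ := pv_sorted_head_last x t
    have hlen : (PySem.List.sorted (x :: t) (fun m => m) false).length = t.length + 1 := by
      rw [(PySem.List.sorted_perm _ _ _).length_eq]; simp
    rw [if_neg hne, hhead, hlast]
    rw [if_neg (by omega : ¬ (1 + (t.length : Int) = 0))]
    by_cases h1 : t.length = 0
    · have ht : t = [] := List.eq_nil_of_length_eq_zero h1
      subst ht
      simp [hlen]
    · rw [if_neg (by rw [hlen]; omega), if_neg (by omega : ¬ (1 + (t.length : Int) = 1))]
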